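-- pv_equiv track=rewrite | github.com/KingWitherBrine/usaco | usaco_citystate_II.py | solve
-- ===== SOURCE A (Python) =====
-- def solve(matrix):
--     d = {}
--     for city, abrev in matrix:
--         d[city] = abrev
--     count = 0
--     for i in d:
--         for j in d:
--             if d[i] == j[:2] and d[j] == i[:2]:
--                 count += 1
--     return count//2
-- ===== SOURCE B (Python) =====
-- def solve(matrix):
--     d = {}
--     for city, abrev in matrix:
--         d[city] = abrev
--     cnt = {}
--     for city, ab in d.items():
--         k = (city[:2], ab)
--         cnt[k] = cnt.get(k, 0) + 1
--     total = 0
--     for city, ab in d.items():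
--         total += cnt.get((ab, city[:2]), 0)
--     return total // 2
-- ===== Notes on version B (the rewrite author's own statement) =====
-- stated objective: faster
-- what changed: Replaces A's nested loop over all key pairs (checking the reciprocal prefix condition for each pair) by a single-pass hash counter keyed on (city[:2], abrev); each entry then adds the count of its swapped key, and the sum is halved as in A.
import Mathlib
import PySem

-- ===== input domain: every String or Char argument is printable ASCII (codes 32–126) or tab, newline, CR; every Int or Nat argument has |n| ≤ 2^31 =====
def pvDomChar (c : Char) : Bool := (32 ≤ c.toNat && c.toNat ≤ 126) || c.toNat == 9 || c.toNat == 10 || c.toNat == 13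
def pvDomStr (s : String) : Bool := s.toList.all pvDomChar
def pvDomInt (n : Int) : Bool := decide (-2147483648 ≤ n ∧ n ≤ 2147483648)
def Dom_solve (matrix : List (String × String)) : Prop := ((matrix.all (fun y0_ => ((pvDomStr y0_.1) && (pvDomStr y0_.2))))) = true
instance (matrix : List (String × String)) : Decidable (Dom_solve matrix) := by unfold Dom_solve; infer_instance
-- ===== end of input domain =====

-- B replaces A's quadratic nested scan over the dict keys by a hash counter on (city[:2], abrev)
-- keys, summing for each entry the count of the swapped key (objective: faster, O(n^2) → O(n)).

-- ===== PORT A =====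
def solve (matrix : List (String × String)) : Int :=
  let d : PySem.Dict String String :=
    matrix.foldl (fun d p => d.insert p.1 p.2) PySem.Dict.empty
  let count : Int :=
    d.keys.foldl (fun c i =>
      d.keys.foldl (fun c j =>
        if (d.getD i "" == PySem.Str.slice j none (some 2)) &&
           (d.getD j "" == PySem.Str.slice i none (some 2)) then c + 1 else c) c) 0
  PySem.Int.floordiv count 2

-- ===== PORT B =====
def solve_alt (matrix : List (String × String)) : Int :=
  let d : PySem.Dict String String :=
    matrix.foldl (fun d p => d.insert p.1 p.2) PySem.Dict.empty
  let cnt : PySem.Dict (String × String) Int :=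
    d.items.foldl (fun c p =>
      c.insert (PySem.Str.slice p.1 none (some 2), p.2)
        (c.getD (PySem.Str.slice p.1 none (some 2), p.2) 0 + 1)) PySem.Dict.empty
  let total : Int :=
    d.items.foldl (fun t p => t + cnt.getD (p.2, PySem.Str.slice p.1 none (some 2)) 0) 0
  PySem.Int.floordiv total 2

-- ===== PRECONDITION & SPEC =====
def Spec_solve (matrix : List (String × String)) (out : Int) : Prop := out = solve_alt matrix
instance (matrix : List (String × String)) (out : Int) : Decidable (Spec_solve matrix out) := by unfold Spec_solve; infer_instance

-- ===== CLAIM (what is proved, stated in full; the proofs are below) =====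
def Claim_equal_solve : Prop := ∀ (matrix : List (String × String)), Dom_solve matrix → Spec_solve matrix (solve matrix)

-- ===== LEMMAS AND PROOFS =====

-- main equivalence lemma: both programs build the same dict; A's nested scan counts, for each
-- key i, the keys j with (j[:2], d[j]) = (d[i], i[:2]); B's counter lookup returns exactly that count.
theorem solve_eq_alt (matrix : List (String × String)) : solve matrix = solve_alt matrix := by
  unfold solve solve_alt
  set d : PySem.Dict String String :=
    matrix.foldl (fun d p => d.insert p.1 p.2) PySem.Dict.empty with hd
  have hnd : d.keys.Nodup := by
    rw [hd]
    exact PySem.Dict.nodup_keys_foldl_insert_key matrix Prod.fst (fun _ p => p.2) _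
      (by simp [PySem.Dict.keys_empty])
  have hitems : d.items = d.keys.map (fun k => (k, d.getD k "")) :=
    PySem.Dict.items_eq_map_keys d hnd ""
  simp only []
  congr 1
  rw [hitems]
  simp only [List.foldl_map]
  have hcnt : ∀ v : String × String,
      (d.keys.foldl (fun c k =>
        c.insert (PySem.Str.slice k none (some 2), d.getD k "")
          (c.getD (PySem.Str.slice k none (some 2), d.getD k "") 0 + 1))
        PySem.Dict.empty).getD v 0
      = ((d.keys.map (fun j => (PySem.Str.slice j none (some 2), d.getD j ""))).count v : Int) := by
    intro v
    have h := PySem.Dict.getD_foldl_insert_add_one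
      (d.keys.map (fun j => (PySem.Str.slice j none (some 2), d.getD j ""))) PySem.Dict.empty v
    simp only [List.foldl_map] at h
    simpa using h
  simp only [hcnt]
  simp only [PySem.List.foldl_if_add_one
    (p := fun j => (_ == PySem.Str.slice j none (some 2)) && (d.getD j "" == _))]
  apply PySem.List.foldl_congr_mem
  intro acc i hi
  congr 1
  rw [List.count_eq_countP, List.countP_map]
  congr 1
  apply List.countP_congr
  intro j hj
  simp only [Function.comp]
  rw [show ((PySem.Str.slice j none (some 2), d.getD j "") ==
        (d.getD i "", PySem.Str.slice i none (some 2)))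
      = ((PySem.Str.slice j none (some 2) == d.getD i "") &&
         (d.getD j "" == PySem.Str.slice i none (some 2))) from rfl,
    Bool.beq_comm (a := PySem.Str.slice j none (some 2))]

-- ===== VERDICT (by name: the statement is the Claim_ definition above) =====
theorem solve_spec : Claim_equal_solve := by
  intro matrix _
  unfold Spec_solve
  exact solve_eq_alt matrix
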